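-- pv_equiv track=rewrite | github.com/Revi1337/BaekJoon-Coding-Test | 백준/Silver/27969. I LOVE JavaScript/I LOVE JavaScript.py | solution
-- ===== SOURCE A (Python) =====
-- def solution(strings):
--     stack = []
--     answer = 0
--     for string in strings:
--         if string != ']':
--             stack.append(string)
--             continue
--
--         tmp = 0
--         while stack:
--             value = stack.pop()
--             if value == '[':
--                 answer += tmp + 8
--                 break
--
--             length = len(value)
--             if value.isdigit():
--                 tmp += 8
--             else:
--                 tmp += length + 12
--
--     return answer
-- ===== SOURCE B (Python) =====
-- def solution(strings):
--     answer = 0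
--     sums = []  # one running partial sum per currently open '['
--     for s in strings:
--         if s == '[':
--             sums.append(0)
--         elif s == ']':
--             if sums:
--                 answer += sums.pop() + 8
--         elif sums:
--             sums[-1] += 8 if s.isdigit() else len(s) + 12
--     return answer
-- ===== Notes on version B (the rewrite author's own statement) =====
-- stated objective: simpler
-- what changed: Instead of pushing raw tokens and re-scanning them with an inner pop loop on each ']', B keeps one running partial sum per open bracket, so each token is weighed once as it arrives and ']' is a single pop-and-add.
import Mathlib
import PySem

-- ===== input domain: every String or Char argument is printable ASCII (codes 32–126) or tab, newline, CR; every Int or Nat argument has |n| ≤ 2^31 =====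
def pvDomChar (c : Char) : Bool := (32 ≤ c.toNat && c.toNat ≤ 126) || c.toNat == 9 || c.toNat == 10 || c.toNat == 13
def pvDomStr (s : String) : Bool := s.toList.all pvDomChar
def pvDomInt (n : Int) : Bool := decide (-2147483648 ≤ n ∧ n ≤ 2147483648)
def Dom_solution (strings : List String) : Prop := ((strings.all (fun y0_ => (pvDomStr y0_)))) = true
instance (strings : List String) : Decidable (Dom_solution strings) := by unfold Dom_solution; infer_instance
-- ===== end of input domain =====

-- B replaces A's token stack with a one-pass stack of running partial sums (simpler, no inner pop loop).

-- ===== PORT A =====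
-- the inner `while stack:` loop: pops until '[' (adding tmp+8 to answer) or until empty; front of list = top
def solPop (stack : List String) (tmp answer : Int) : List String × Int :=
  match stack with
  | [] => ([], answer)
  | value :: rest =>
    if value = "[" then (rest, answer + (tmp + 8))
    else
      let length : Int := PySem.Str.len value
      if PySem.Str.strIsdigit value then solPop rest (tmp + 8) answer
      else solPop rest (tmp + (length + 12)) answer

def solution (strings : List String) : Int :=
  (strings.foldl (fun (st : List String × Int) string =>
    if string ≠ "]" then (string :: st.1, st.2)
    else solPop st.1 0 st.2) ([], 0)).2

-- ===== PORT B =====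
def solution_alt (strings : List String) : Int :=
  (strings.foldl (fun (st : List Int × Int) s =>
    if s = "[" then (0 :: st.1, st.2)
    else if s = "]" then
      match st.1 with
      | t :: rest => (rest, st.2 + (t + 8))
      | [] => st
    else
      match st.1 with
      | t :: rest => ((t + (if PySem.Str.strIsdigit s then 8 else PySem.Str.len s + 12)) :: rest, st.2)
      | [] => st) ([], 0)).2

-- ===== PRECONDITION & SPEC =====
def Spec_solution (strings : List String) (out : Int) : Prop := out = solution_alt strings
instance (strings : List String) (out : Int) : Decidable (Spec_solution strings out) := by unfold Spec_solution; infer_instance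

-- ===== CLAIM (what is proved, stated in full; the proofs are below) =====
def Claim_equal_solution : Prop := ∀ (strings : List String), Dom_solution strings → Spec_solution strings (solution strings)

-- ===== LEMMAS AND PROOFS =====

-- weight a non-'[' token contributes
def tokW (s : String) : Int := if PySem.Str.strIsdigit s then 8 else PySem.Str.len s + 12

-- abstraction: A's token stack → B's stack of partial sums (tokens below the lowest '[' are dropped)
def absStack : List String → List Int
  | [] => []
  | x :: r =>
    if x = "[" then 0 :: absStack r
    else match absStack r with
      | [] => []
      | t :: ts => (t + tokW x) :: ts

theorem solPop_cons_ne (x : String) (r : List String) (tmp ans : Int) (hx : ¬ x = "[") :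
    solPop (x :: r) tmp ans = solPop r (tmp + tokW x) ans := by
  simp only [solPop, if_neg hx, tokW]
  split_ifs with hd <;> rfl

theorem solPop_spec (stack : List String) (tmp answer : Int) :
    (match absStack stack with
     | [] => absStack (solPop stack tmp answer).1 = [] ∧ (solPop stack tmp answer).2 = answer
     | t :: ts => absStack (solPop stack tmp answer).1 = ts ∧
                  (solPop stack tmp answer).2 = answer + (tmp + t + 8)) := by
  induction stack generalizing tmp with
  | nil => simp [absStack, solPop]
  | cons x r ih =>
    by_cases hx : x = "["
    · simp [absStack, solPop, hx]
    · rw [solPop_cons_ne x r tmp answer hx]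
      have key := ih (tmp + tokW x)
      cases h : absStack r with
      | nil =>
        simp only [h] at key
        simp only [absStack, if_neg hx, h]
        exact key
      | cons t ts =>
        simp only [h] at key
        simp only [absStack, if_neg hx, h]
        exact ⟨key.1, by rw [key.2]; ring⟩

theorem fold_invariant (strings : List String) (stA : List String) (ans : Int) :
    (strings.foldl (fun (st : List Int × Int) s =>
      if s = "[" then (0 :: st.1, st.2)
      else if s = "]" then
        match st.1 with
        | t :: rest => (rest, st.2 + (t + 8))
        | [] => st
      else
        match st.1 with
        | t :: rest => ((t + (if PySem.Str.strIsdigit s then 8 else PySem.Str.len s + 12)) :: rest, st.2)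
        | [] => st) (absStack stA, ans)).2
    = (strings.foldl (fun (st : List String × Int) string =>
        if string ≠ "]" then (string :: st.1, st.2)
        else solPop st.1 0 st.2) (stA, ans)).2 := by
  induction strings generalizing stA ans with
  | nil => rfl
  | cons s rest ih =>
    simp only [List.foldl_cons]
    by_cases hb : s = "]"
    · subst hb
      have hsp := solPop_spec stA 0 ans
      rcases hP : solPop stA 0 ans with ⟨st', a'⟩
      rw [hP] at hsp
      cases h : absStack stA with
      | nil =>
        simp only [h] at hsp
        obtain ⟨h1, h2⟩ := hsp
        subst h2
        have key := ih st' a'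
        rw [h1] at key
        simpa [h, hP] using key
      | cons t ts =>
        simp only [h] at hsp
        obtain ⟨h1, h2⟩ := hsp
        subst h2
        have key := ih st' (ans + (0 + t + 8))
        rw [h1] at key
        simpa [h, hP, show ans + (0 + t + 8) = ans + (t + 8) from by ring] using key
    · by_cases ho : s = "["
      · subst ho
        have key := ih ("[" :: stA) ans
        rw [show absStack ("[" :: stA) = 0 :: absStack stA from by simp [absStack]] at key
        simpa using key
      · have key := ih (s :: stA) ans
        cases h : absStack stA with
        | nil =>
          rw [show absStack (s :: stA) = [] from by simp [absStack, ho, h]] at key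
          simpa [hb, ho, h] using key
        | cons t ts =>
          rw [show absStack (s :: stA) = (t + tokW s) :: ts from by simp [absStack, ho, h]] at key
          simpa [hb, ho, h, tokW] using key

-- ===== VERDICT (by name: the statement is the Claim_ definition above) =====
theorem solution_spec : Claim_equal_solution := by
  intro strings _
  unfold Spec_solution solution solution_alt
  exact (fold_invariant strings [] 0).symm
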